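-- pv_equiv track=rewrite | github.com/Adam0s007/DSA | holiday problems/zestaw 2/egzp2a/egzP2a/egzP2a.py | zdjecie
-- ===== SOURCE A (Python) =====
-- def quickSelect(tab,k): #O(n)
--     def qSelect(l,r,k):
--         pivot,p = tab[r],l
--         for i in range(l,r):
--             if tab[i][1] >= pivot[1]:
--                 tab[p],tab[i] =  tab[i],tab[p]
--                 p+=1
--
--         tab[r],tab[p] = tab[p], tab[r]
--         if p > k: return qSelect(l,p-1,k)
--         elif p < k: return qSelect(p+1,r,k)
--         else: return tab[p]
--     return qSelect(0,len(tab)-1,k)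
--
-- def zdjecie(T, m, k): #pierwsza pozycja do rozpatrywania w quick select'cie: n - k- 1
--     newT = [(elem[0],elem[1]) for elem in T]
--     n = len(T)
--     pos = n - 1 #pozycja poczatkowa (ostatni element)
--     punkty = [] # przydadzą się na później
--
--     #szukamy pierwszych pozycji z kazdego rzędu (pierwsza pozycja w kazdym rzedzie to pos+1 natomiast
--     #ostatnia pozycja z kazdego rzędu do pos
--     '''na poczatku chcemy aby tablica newT byla postaci: [obszar najwiekszych liczb..., mniejsze liczby..., najmniejsze]
--     - takich rzędów ma być m'''
--     for i in range(m): # o(m)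
--         pos -=(k+i) #poniewaz kazdy nastepny rząd jest wiekszy o 1 to k jest zwiekszane w kazdej iteracji o 1
--         punkty.append(pos+1) #tutaj wkladamy pierwsze pozycje z kazdego rzędu!
--         if pos < 0: break # ostatnia pozycja wyniesie -1
--         quickSelect(newT,pos) #O(n) #wiemy ze element na ostatniej pozycji danego wiersza jest wiekszy
--         # w stosunku do wszystkich elementow w wierszu pod nim
--     '''teraz chcemy te wszystkie liczby z tablicy newT uporządkować zgodnie z warunkami zadania'''
--     punkty.reverse() #nasze punkty zostaly wpisane w malejącej kolejności wiec stosujemy reverse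
--     x = 0 #bedziemy do oryginalnej tablicy przypisywac na inkrementowanej pozycji x elementy z tablicy newT
--     for i in range(k+m-1): #k+m-1 to jest dlugosc najdluzszego wiersza
--         for punkt in punkty:
--             if punkt + i < len(newT): #kazdy punkt poczatkowy z kazdego wiersza jest inkrementowany
--                 T[x] = newT[punkt+i]
--                 x+=1
--                 if x == len(newT): break
--         if x == len(newT): break
--
--     return T
-- ===== SOURCE B (Python) =====
-- # B: textbook iterative quickselect around a standalone Lomuto partition function,
-- # row-start positions computed by a closed formula, and the reassembly written as one
-- # comprehension truncated to len(newT); objective: simpler.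
-- # Like the original, zdjecie assigns into T in place; the equivalence is about the return value.
-- def partition(tab, l, r):
--     """Lomuto partition of tab[l..r] around tab[r] (descending by second field);
--     returns the pivot's final index."""
--     p = l
--     for i in range(l, r):
--         if tab[i][1] >= tab[r][1]:
--             tab[p], tab[i] = tab[i], tab[p]
--             p += 1
--     tab[r], tab[p] = tab[p], tab[r]
--     return p
--
-- def quickSelect(tab, k):
--     l, r = 0, len(tab) - 1
--     while True:
--         p = partition(tab, l, r)
--         if p > k:
--             r = p - 1
--         elif p < k:
--             l = p + 1
--         else:
--             return tab[p]
--
-- def zdjecie(T, m, k):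
--     newT = [(e[0], e[1]) for e in T]
--     n = len(newT)
--     punkty = []
--     for i in range(m):
--         # start-1 of row i: n - 1 minus the total length of rows 0..i
--         pos = n - 1 - (i + 1) * k - i * (i + 1) // 2
--         punkty.append(pos + 1)
--         if pos < 0:
--             break
--         quickSelect(newT, pos)
--     punkty.reverse()
--     out = [newT[p + i] for i in range(k + m - 1) for p in punkty if p + i < n][:n]
--     T[:len(out)] = out
--     return T
-- ===== Notes on version B (the rewrite author's own statement) =====
-- stated objective: simpler
-- what changed: quickSelect becomes the textbook iterative while-loop around a standalone Lomuto partition function instead of A's inner recursive closure, the row-start positions are computed by a closed arithmetic formula instead of a running decrement carried across the loop, and the reassembly is a single comprehension truncated to len(newT) instead of nested index-writing loops with break bookkeeping; Pre_ excludes only inputs where A raises (rows with fewer than 2 entries, negative k with m > 0, and row starts falling below -len so the reassembly indexes out of range).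
import Mathlib
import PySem

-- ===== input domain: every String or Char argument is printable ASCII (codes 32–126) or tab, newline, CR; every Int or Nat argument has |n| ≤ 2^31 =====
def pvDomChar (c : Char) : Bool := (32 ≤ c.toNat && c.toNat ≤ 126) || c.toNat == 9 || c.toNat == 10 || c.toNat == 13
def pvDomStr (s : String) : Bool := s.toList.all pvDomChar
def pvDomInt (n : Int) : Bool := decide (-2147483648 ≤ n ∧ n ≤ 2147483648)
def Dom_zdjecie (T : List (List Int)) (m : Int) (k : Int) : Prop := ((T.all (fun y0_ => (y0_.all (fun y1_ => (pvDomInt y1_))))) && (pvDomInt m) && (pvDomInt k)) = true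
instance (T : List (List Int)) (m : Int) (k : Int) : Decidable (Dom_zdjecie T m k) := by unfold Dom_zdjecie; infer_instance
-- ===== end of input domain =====

-- B is the textbook iterative quickselect: a standalone Lomuto partition function inside a
-- while-loop, the row-start positions computed by a closed formula instead of a running
-- decrement, and the reassembly written as one comprehension truncated to len(newT);
-- objective: simpler. Like A, the Python B assigns into T in place (same final contents);
-- the equivalence proved here is about the return value.

-- ===== PORT A =====
-- tab[p],tab[i] = tab[i],tab[p] (indices are in range whenever Python reaches them under Pre_)
def pvSwap (tab : List (List Int)) (i j : Nat) : List (List Int) :=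
  (tab.set i (tab.getD j [])).set j (tab.getD i [])

-- the partition steps of qSelect: pivot = tab[r]; for i in range(l,r): …; tab[r],tab[p] = tab[p],tab[r]
-- (row[1] is row.getD 1 0 — exact: rows have ≥ 2 elements under Pre_)
def pvPartitionA (tab : List (List Int)) (l r : Nat) : List (List Int) × Nat :=
  let pivot := tab.getD r []
  let s := (List.range' l (r - l)).foldl
      (fun (s : List (List Int) × Nat) i =>
        if pivot.getD 1 0 ≤ (s.1.getD i []).getD 1 0 then (pvSwap s.1 s.2 i, s.2 + 1) else s)
      (tab, l)
  (pvSwap s.1 r s.2, s.2)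

-- qSelect(l,r,k); returns the mutated tab (zdjecie discards the returned element);
-- fuel = tab.length bounds Python's recursion depth, which always terminates
def pvQSelA : Nat → List (List Int) → Nat → Nat → Nat → List (List Int)
  | 0, tab, _, _, _ => tab
  | fuel + 1, tab, l, r, k =>
      let s := pvPartitionA tab l r
      if k < s.2 then pvQSelA fuel s.1 l (s.2 - 1) k
      else if s.2 < k then pvQSelA fuel s.1 (s.2 + 1) r k
      else s.1

-- quickSelect(tab, k): k.toNat is exact since zdjecie only calls it with 0 ≤ k under Pre_
def pvQuickSelectA (tab : List (List Int)) (k : Int) : List (List Int) :=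
  pvQSelA tab.length tab 0 (tab.length - 1) k.toNat

-- for i in range(m): pos -= (k+i); punkty.append(pos+1); if pos < 0: break; quickSelect(newT,pos)
def pvLoop1A (k : Int) : List Int → Int → List Int → List (List Int) → List Int × List (List Int)
  | [], _, punkty, newT => (punkty, newT)
  | i :: rest, pos, punkty, newT =>
      let pos' := pos - (k + i)
      if pos' < 0 then (punkty ++ [pos' + 1], newT)
      else pvLoop1A k rest pos' (punkty ++ [pos' + 1]) (pvQuickSelectA newT pos')

-- for punkt in punkty: if punkt+i < len(newT): T[x] = newT[punkt+i]; x += 1; if x == len(newT): break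
-- (newT[punkt+i] may be a negative in-range index — pyGet? wraps like Python; none = IndexError, outside Pre_)
def pvInner2A (newT : List (List Int)) (i : Int) : List Int → List (List Int) → Int → List (List Int) × Int
  | [], T, x => (T, x)
  | punkt :: ps, T, x =>
      if punkt + i < (newT.length : Int) then
        let T' := T.set x.toNat ((PySem.List.pyGet? newT (punkt + i)).getD [])
        if x + 1 = (newT.length : Int) then (T', x + 1)
        else pvInner2A newT i ps T' (x + 1)
      else pvInner2A newT i ps T x

-- for i in range(k+m-1): …inner…; if x == len(newT): break
def pvLoop2A (newT : List (List Int)) (punkty : List Int) : List Int → List (List Int) → Int → List (List Int)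
  | [], T, _ => T
  | i :: is, T, x =>
      let s := pvInner2A newT i punkty T x
      if s.2 = (newT.length : Int) then s.1 else pvLoop2A newT punkty is s.1 s.2

def zdjecie (T : List (List Int)) (m : Int) (k : Int) : List (List Int) :=
  let newT := T.map (fun e => [e.getD 0 0, e.getD 1 0])  -- (elem[0], elem[1]); exact: rows have ≥ 2 elements under Pre_
  let s := pvLoop1A k (PySem.List.pyRange 0 m 1) ((T.length : Int) - 1) [] newT
  pvLoop2A s.2 s.1.reverse (PySem.List.pyRange 0 (k + m - 1) 1) T 0

-- ===== PORT B =====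
-- Source B mutates one Python list object inside partition/quickSelect and passes it through the
-- row loop; the port models that object as a Lean Array (PvFoto) and converts once at entry
abbrev PvRow : Type := List Int
abbrev PvFoto : Type := Array PvRow

def pvSwapArr (a : PvFoto) (u v : Nat) : PvFoto :=
  (a.setIfInBounds u (a.getD v [])).setIfInBounds v (a.getD u [])

-- partition(tab, l, r): p = l; for i in range(l, r): if tab[i][1] >= tab[r][1]: swap, p += 1;
-- final swap; returns the mutated array together with p (tab[r] is re-read at every
-- comparison, exactly as Source B writes it)
def pvPartitionB (a : PvFoto) (lo hi : Nat) : PvFoto × Nat :=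
  let acc := (List.range' lo (hi - lo)).foldl
      (fun (acc : PvFoto × Nat) idx =>
        if (acc.1.getD hi []).getD 1 0 ≤ (acc.1.getD idx []).getD 1 0
        then (pvSwapArr acc.1 acc.2 idx, acc.2 + 1) else acc)
      (a, lo)
  (pvSwapArr acc.1 hi acc.2, acc.2)

-- the while-True loop of B's quickSelect; gas = size of the array bounds the iteration count
def pvQSelB : Nat → PvFoto → Nat → Nat → Nat → PvFoto
  | 0, a, _, _, _ => a
  | gas + 1, a, lo, hi, key =>
      let pp := pvPartitionB a lo hi
      if key < pp.2 then pvQSelB gas pp.1 lo (pp.2 - 1) key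
      else if pp.2 < key then pvQSelB gas pp.1 (pp.2 + 1) hi key
      else pp.1

def pvQuickSelectB (a : PvFoto) (key : Int) : PvFoto :=
  pvQSelB a.size a 0 (a.size - 1) key.toNat

-- for i in range(m): pos = n - 1 - (i+1)*k - i*(i+1)//2; punkty.append(pos+1);
-- if pos < 0: break; quickSelect(newT, pos)   — pos in closed form, no running decrement
def pvRowsB (n kk : Int) : List Int → List Int → PvFoto → List Int × PvFoto
  | [], starts, arr => (starts, arr)
  | idx :: more, starts, arr =>
      let start := n - 1 - (idx + 1) * kk - PySem.Int.floordiv (idx * (idx + 1)) 2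
      if start < 0 then (starts.concat (start + 1), arr)
      else pvRowsB n kk more (starts.concat (start + 1)) (pvQuickSelectB arr start)

-- [newT[p + i] for i in cols for p in punkty if p + i < n][:n]
def pvOutB (arr : PvFoto) (starts cols : List Int) : List PvRow :=
  (cols.flatMap (fun c =>
      (starts.filter (fun q => q + c < (arr.size : Int))).map
        (fun q => (PySem.List.pyGet? arr.toList (q + c)).getD []))).take arr.size

def zdjecie_alt (T : List (List Int)) (m : Int) (k : Int) : List (List Int) :=
  let arr0 : PvFoto := (T.map (fun e => [e.getD 0 0, e.getD 1 0])).toArray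
  let st := pvRowsB (T.length : Int) k (PySem.List.pyRange 0 m 1) [] arr0
  let out := pvOutB st.2 st.1.reverse (PySem.List.pyRange 0 (k + m - 1) 1)
  out ++ T.drop out.length  -- T[:len(out)] = out; return T

-- ===== PRECONDITION & SPEC =====
-- pos after loop-1 iteration i, in closed form: n-1 - ((i+1)*k + (0+1+…+i))
def pvS (n k : Int) (i : Nat) : Int := n - 1 - ((i + 1) * k + ((i * (i + 1)) / 2 : Nat))

-- Pre_ = exactly the inputs where Python A returns: every row needs ≥ 2 entries (the newT
-- comprehension reads elem[0], elem[1]); a negative k with m > 0 sends quickSelect out of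
-- range (IndexError); and if the first row-start that falls below 0 falls below -n while the
-- reassembly loop runs at least one column, newT[punkt+i] raises IndexError.
def Pre_zdjecie (T : List (List Int)) (m : Int) (k : Int) : Prop :=
  (∀ row ∈ T, 2 ≤ row.length) ∧ (0 ≤ k ∨ m ≤ 0) ∧
  ¬ (1 ≤ k + m - 1 ∧ ∃ i ∈ List.range (T.length + 1), (i : Int) < m ∧
      (∀ j ∈ List.range i, 0 ≤ pvS T.length k j) ∧ pvS T.length k i < -(T.length : Int) - 1)

instance (T : List (List Int)) (m : Int) (k : Int) : Decidable (Pre_zdjecie T m k) := by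
  unfold Pre_zdjecie; infer_instance

def pvWitness_zdjecie : List (List Int) × Int × Int := ([[1, 2], [3, 4], [5, 6]], 2, 1)

def Spec_zdjecie (T : List (List Int)) (m : Int) (k : Int) (out : List (List Int)) : Prop := out = zdjecie_alt T m k
instance (T : List (List Int)) (m : Int) (k : Int) (out : List (List Int)) : Decidable (Spec_zdjecie T m k out) := by unfold Spec_zdjecie; infer_instance

-- ===== CLAIM (what is proved, stated in full; the proofs are below) =====
def Claim_equal_zdjecie : Prop := ∀ (T : List (List Int)) (m : Int) (k : Int), Dom_zdjecie T m k → Pre_zdjecie T m k → Spec_zdjecie T m k (zdjecie T m k)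

-- ===== LEMMAS AND PROOFS =====
-- the per-row slice of the reassembly: [newT[p+i] for p in punkty if p+i < n]
def pvRowPick (newT : List (List Int)) (punkty : List Int) (i : Int) : List (List Int) :=
  (punkty.filter (fun p => p + i < (newT.length : Int))).map
    (fun p => (PySem.List.pyGet? newT (p + i)).getD [])

theorem pvOutB_toList (arr : PvFoto) (starts cols : List Int) :
    pvOutB arr starts cols
      = (cols.flatMap (pvRowPick arr.toList starts)).take arr.toList.length := by
  unfold pvOutB
  have hfn : (fun c => (starts.filter (fun q => q + c < (arr.size : Int))).map
        (fun q => (PySem.List.pyGet? arr.toList (q + c)).getD []))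
      = pvRowPick arr.toList starts := by
    funext c
    simp [pvRowPick]
  rw [hfn, Array.length_toList]

theorem pv_set_appcons {α : Type} (a : List α) (x y : α) (b : List α) :
    (a ++ x :: b).set a.length y = a ++ y :: b := by
  induction a with
  | nil => simp
  | cons h t ih => simp [ih]

theorem pvSwap_length (tab : List (List Int)) (i j : Nat) :
    (pvSwap tab i j).length = tab.length := by
  simp [pvSwap]

theorem pvSwap_getD_ne (tab : List (List Int)) (i j r : Nat) (hi : i ≠ r) (hj : j ≠ r) :
    (pvSwap tab i j).getD r [] = tab.getD r [] := by
  unfold pvSwap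
  rw [List.getD_eq_getElem?_getD, List.getD_eq_getElem?_getD,
      List.getElem?_set_ne hj, List.getElem?_set_ne hi, ← List.getD_eq_getElem?_getD]

-- the partition scan with the pivot re-read from the array equals the scan with the pivot
-- value fixed upfront: all swaps touch indices below r, so tab[r] never changes
theorem pv_fold_pivB_eq (r : Nat) (piv : List Int) :
    ∀ (t j : Nat) (tab : List (List Int)) (p : Nat), p ≤ j → j + t ≤ r →
      tab.getD r [] = piv →
      (List.range' j t).foldl
        (fun (st : List (List Int) × Nat) i =>
          if (st.1.getD r []).getD 1 0 ≤ (st.1.getD i []).getD 1 0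
          then (pvSwap st.1 st.2 i, st.2 + 1) else st) (tab, p)
      = (List.range' j t).foldl
        (fun (s : List (List Int) × Nat) i =>
          if piv.getD 1 0 ≤ (s.1.getD i []).getD 1 0 then (pvSwap s.1 s.2 i, s.2 + 1) else s)
        (tab, p) := by
  intro t
  induction t with
  | zero => intro j tab p _ _ _; rfl
  | succ t ih =>
    intro j tab p hpj hjt hpiv
    rw [List.range'_succ]
    simp only [List.foldl_cons, hpiv]
    by_cases hc : piv.getD 1 0 ≤ (tab.getD j []).getD 1 0
    · rw [if_pos hc]
      exact ih (j + 1) (pvSwap tab p j) (p + 1) (by omega) (by omega)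
        (by rw [pvSwap_getD_ne tab p j r (by omega) (by omega)]; exact hpiv)
    · rw [if_neg hc]
      exact ih (j + 1) tab p (by omega) (by omega) hpiv

theorem pv_arr_getD (a : Array (List Int)) (i : Nat) (d : List Int) :
    a.getD i d = a.toList.getD i d := by
  unfold Array.getD
  rw [List.getD_eq_getElem?_getD]
  split
  · rename_i h; rw [List.getElem?_eq_getElem (by simpa using h)]; simp
  · rename_i h; rw [List.getElem?_eq_none (by simp; omega)]; rfl

theorem pvSwapArr_toList (a : Array (List Int)) (i j : Nat) :
    (pvSwapArr a i j).toList = pvSwap a.toList i j := by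
  simp [pvSwapArr, pvSwap, Array.toList_setIfInBounds]

-- the array-level partition scan projects to the list-level scan with the pivot re-read
theorem pv_foldArr (r : Nat) :
    ∀ (is : List Nat) (a : Array (List Int)) (p : Nat),
      (((is.foldl
          (fun (st : Array (List Int) × Nat) i =>
            if (st.1.getD r []).getD 1 0 ≤ (st.1.getD i []).getD 1 0
            then (pvSwapArr st.1 st.2 i, st.2 + 1) else st) (a, p)).1).toList,
        (is.foldl
          (fun (st : Array (List Int) × Nat) i =>
            if (st.1.getD r []).getD 1 0 ≤ (st.1.getD i []).getD 1 0
            then (pvSwapArr st.1 st.2 i, st.2 + 1) else st) (a, p)).2)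
      = is.foldl
          (fun (st : List (List Int) × Nat) i =>
            if (st.1.getD r []).getD 1 0 ≤ (st.1.getD i []).getD 1 0
            then (pvSwap st.1 st.2 i, st.2 + 1) else st) (a.toList, p) := by
  intro is
  induction is with
  | nil => intro a p; rfl
  | cons i rest ih =>
    intro a p
    simp only [List.foldl_cons]
    rw [pv_arr_getD a r, pv_arr_getD a i]
    by_cases hc : (a.toList.getD r []).getD 1 0 ≤ (a.toList.getD i []).getD 1 0
    · rw [if_pos hc, if_pos hc]
      rw [← pvSwapArr_toList]
      exact ih (pvSwapArr a p i) (p + 1)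
    · rw [if_neg hc, if_neg hc]
      exact ih a p

theorem pvPartitionB_toList (a : Array (List Int)) (l r : Nat) :
    ((pvPartitionB a l r).1.toList, (pvPartitionB a l r).2) = pvPartitionA a.toList l r := by
  unfold pvPartitionB pvPartitionA
  dsimp only
  rw [pvSwapArr_toList]
  by_cases hlr : l ≤ r
  · rw [← pv_fold_pivB_eq r (a.toList.getD r []) (r - l) l a.toList l (le_refl l) (by omega) rfl,
        ← pv_foldArr r (List.range' l (r - l)) a l]
  · rw [show r - l = 0 by omega]
    rfl

theorem pv_foldA_len (piv : List Int) :
    ∀ (is : List Nat) (tab : List (List Int)) (p : Nat),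
      ((is.foldl
        (fun (s : List (List Int) × Nat) i =>
          if piv.getD 1 0 ≤ (s.1.getD i []).getD 1 0 then (pvSwap s.1 s.2 i, s.2 + 1) else s)
        (tab, p)).1).length = tab.length := by
  intro is
  induction is with
  | nil => intro tab p; rfl
  | cons i rest ih =>
    intro tab p
    simp only [List.foldl_cons]
    by_cases hc : piv.getD 1 0 ≤ (tab.getD i []).getD 1 0
    · rw [if_pos hc, ih, pvSwap_length]
    · rw [if_neg hc, ih]

theorem pvPartitionA_len (tab : List (List Int)) (l r : Nat) :
    (pvPartitionA tab l r).1.length = tab.length := by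
  unfold pvPartitionA
  rw [pvSwap_length, pv_foldA_len]

theorem pvQSelB_toList :
    ∀ (fuel : Nat) (a : Array (List Int)) (l r k : Nat),
      (pvQSelB fuel a l r k).toList = pvQSelA fuel a.toList l r k := by
  intro fuel
  induction fuel with
  | zero => intro a l r k; rfl
  | succ fuel ih =>
    intro a l r k
    rw [pvQSelA, pvQSelB]
    have h := pvPartitionB_toList a l r
    rw [Prod.ext_iff] at h
    rw [← h.1, ← h.2]
    split_ifs <;> first | apply ih | rfl

theorem pvQSelA_len :
    ∀ (fuel : Nat) (tab : List (List Int)) (l r k : Nat),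
      (pvQSelA fuel tab l r k).length = tab.length := by
  intro fuel
  induction fuel with
  | zero => intro tab l r k; rfl
  | succ fuel ih =>
    intro tab l r k
    rw [pvQSelA]
    split_ifs <;> first
      | (rw [ih, pvPartitionA_len])
      | exact pvPartitionA_len tab l r

theorem pvQuickSelectB_toList (a : PvFoto) (key : Int) :
    (pvQuickSelectB a key).toList = pvQuickSelectA a.toList key := by
  unfold pvQuickSelectA pvQuickSelectB
  rw [pvQSelB_toList, Array.length_toList]

theorem pvQuickSelectA_len (tab : List (List Int)) (p : Int) :
    (pvQuickSelectA tab p).length = tab.length :=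
  pvQSelA_len tab.length tab 0 (tab.length - 1) p.toNat

theorem pvLoop1A_len (k : Int) :
    ∀ (rng : List Int) (pos : Int) (punkty : List Int) (newT : List (List Int)),
      (pvLoop1A k rng pos punkty newT).2.length = newT.length := by
  intro rng
  induction rng with
  | nil => intro pos punkty newT; rfl
  | cons i rest ih =>
    intro pos punkty newT
    rw [pvLoop1A]
    by_cases h : pos - (k + i) < 0
    · rw [if_pos h]
    · rw [if_neg h, ih, pvQuickSelectA_len]

theorem pv_fd_two (c : Int) : PySem.Int.floordiv (2 * c) 2 = c := by
  rw [PySem.Int.floordiv_eq_ediv_of_pos (by norm_num)]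
  exact Int.mul_ediv_cancel_left c (by norm_num)

-- one step of A's running decrement equals the closed formula at the next index
theorem pv_pos_step (n k j : Int) :
    (n - 1 - j * k - PySem.Int.floordiv (j * (j - 1)) 2) - (k + j)
      = n - 1 - (j + 1) * k - PySem.Int.floordiv (j * (j + 1)) 2 := by
  obtain ⟨c, hc⟩ := Int.even_mul_succ_self j
  obtain ⟨c', hc'⟩ := Int.even_mul_succ_self (j - 1)
  have hc2 : j * (j + 1) = 2 * c := by omega
  have hc2' : j * (j - 1) = 2 * c' := by
    have : (j - 1) * (j - 1 + 1) = j * (j - 1) := by ring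
    omega
  rw [hc2, hc2', pv_fd_two, pv_fd_two]
  have hcc : c = c' + j := by nlinarith [hc2, hc2']
  rw [hcc]; ring

theorem pvRows_eq (n k m : Int) :
    ∀ (t : Nat) (j : Int), m - j ≤ (t : Int) →
      ∀ (punkty : List Int) (arr : PvFoto),
        pvLoop1A k (PySem.List.pyRange j m 1)
            (n - 1 - j * k - PySem.Int.floordiv (j * (j - 1)) 2) punkty arr.toList
          = ((pvRowsB n k (PySem.List.pyRange j m 1) punkty arr).1,
             (pvRowsB n k (PySem.List.pyRange j m 1) punkty arr).2.toList) := by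
  intro t
  induction t with
  | zero =>
    intro j hjt punkty arr
    rw [PySem.List.pyRange_one_eq_nil (by omega)]
    rfl
  | succ t ih =>
    intro j hjt punkty arr
    by_cases hjm : j < m
    · rw [PySem.List.pyRange_one_cons hjm]
      rw [pvLoop1A, pvRowsB]
      simp only [List.concat_eq_append]
      rw [pv_pos_step n k j]
      by_cases hneg : n - 1 - (j + 1) * k - PySem.Int.floordiv (j * (j + 1)) 2 < 0
      · rw [if_pos hneg, if_pos hneg]
      · rw [if_neg hneg, if_neg hneg, ← pvQuickSelectB_toList]
        have he : j * (j + 1) = (j + 1) * ((j + 1) - 1) := by ring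
        rw [he]
        exact ih (j + 1) (by omega) _ _
    · rw [PySem.List.pyRange_one_eq_nil (by omega)]
      rfl

theorem pvInner2A_eq (T0 newT : List (List Int)) (i : Int)
    (hlen : newT.length = T0.length) :
    ∀ (ps : List Int) (out : List (List Int)),
      out.length ≤ newT.length →
      (out.length < newT.length ∨ ∀ p ∈ ps, ¬ (p + i < (newT.length : Int))) →
      pvInner2A newT i ps (out ++ T0.drop out.length) ((out.length : Int))
        = (((out ++ pvRowPick newT ps i).take newT.length)
             ++ T0.drop ((out ++ pvRowPick newT ps i).take newT.length).length,
           ((((out ++ pvRowPick newT ps i).take newT.length).length : Int))) := by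
  intro ps
  induction ps with
  | nil =>
    intro out hle _
    simp only [pvRowPick, List.filter_nil, List.map_nil, List.append_nil,
      List.take_of_length_le hle]
    rfl
  | cons p ps ih =>
    intro out hle hdisj
    rw [pvInner2A]
    simp only [pvRowPick, List.filter_cons]
    by_cases hc : p + i < (newT.length : Int)
    · rw [if_pos hc]
      simp only [hc, decide_true, if_pos, List.map_cons]
      have hlt : out.length < newT.length := by
        rcases hdisj with h | h
        · exact h
        · exact absurd hc (h p (by simp))
      have hltT : out.length < T0.length := by omega
      have hset : (out ++ T0.drop out.length).set ((out.length : Int)).toNat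
            ((PySem.List.pyGet? newT (p + i)).getD [])
          = (out ++ [(PySem.List.pyGet? newT (p + i)).getD []])
              ++ T0.drop (out ++ [(PySem.List.pyGet? newT (p + i)).getD []]).length := by
        rw [Int.toNat_natCast, List.drop_eq_getElem_cons hltT, pv_set_appcons]
        simp
      set g : List Int := (PySem.List.pyGet? newT (p + i)).getD [] with hg
      by_cases heq : out.length + 1 = newT.length
      · rw [if_pos (by omega : ((out.length : Int)) + 1 = (newT.length : Int))]
        have htk : (out ++ g :: (ps.filter (fun p => p + i < (newT.length : Int))).map
              (fun p => (PySem.List.pyGet? newT (p + i)).getD [])).take newT.length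
            = out ++ [g] := by
          rw [show out ++ g :: (ps.filter (fun p => p + i < (newT.length : Int))).map
                (fun p => (PySem.List.pyGet? newT (p + i)).getD [])
              = (out ++ [g]) ++ (ps.filter (fun p => p + i < (newT.length : Int))).map
                (fun p => (PySem.List.pyGet? newT (p + i)).getD []) by simp]
          rw [List.take_append_of_le_length (by simp; omega), List.take_of_length_le (by simp; omega)]
        rw [htk, hset]
        have : ((out.length : Int)) + 1 = (((out ++ [g]).length : Int)) := by simp
        rw [this]
      · rw [if_neg (by omega : ¬ (((out.length : Int)) + 1 = (newT.length : Int)))]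
        rw [hset]
        have hcast : ((out.length : Int)) + 1 = (((out ++ [g]).length : Int)) := by simp
        rw [hcast]
        have := ih (out ++ [g]) (by simp; omega) (by left; simp; omega)
        rw [this]
        simp only [pvRowPick]
        rw [show (out ++ [g]) ++ (ps.filter (fun p => p + i < (newT.length : Int))).map
              (fun p => (PySem.List.pyGet? newT (p + i)).getD [])
            = out ++ g :: (ps.filter (fun p => p + i < (newT.length : Int))).map
              (fun p => (PySem.List.pyGet? newT (p + i)).getD []) by simp]
    · rw [if_neg hc]
      simp only [hc, decide_false]
      rw [if_neg (by simp)]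
      refine ih out hle ?_
      rcases hdisj with h | h
      · exact Or.inl h
      · exact Or.inr (fun q hq => h q (by simp [hq]))

theorem pvLoop2A_eq (T0 newT : List (List Int)) (punkty : List Int)
    (hlen : newT.length = T0.length)
    (hpk : 0 < newT.length ∨ ∀ p ∈ punkty, 0 ≤ p) :
    ∀ (cols : List Int) (out : List (List Int)),
      (∀ i ∈ cols, 0 ≤ i) → out.length ≤ newT.length →
      (newT.length = 0 ∨ out.length < newT.length) →
      pvLoop2A newT punkty cols (out ++ T0.drop out.length) ((out.length : Int))
        = ((out ++ cols.flatMap (pvRowPick newT punkty)).take newT.length)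
            ++ T0.drop ((out ++ cols.flatMap (pvRowPick newT punkty)).take newT.length).length := by
  intro cols
  induction cols with
  | nil =>
    intro out _ hle _
    simp only [List.flatMap_nil, List.append_nil, List.take_of_length_le hle]
    rfl
  | cons i cs ih =>
    intro out hcols hle hok
    have hi : 0 ≤ i := hcols i (by simp)
    rw [pvLoop2A]
    have hdisj : out.length < newT.length ∨ ∀ p ∈ punkty, ¬ (p + i < (newT.length : Int)) := by
      rcases hok with hz | hlt
      · right
        rcases hpk with hpos | hall
        · omega
        · intro p hp
          have := hall p hp
          rw [hz]
          omega
      · left; exact hlt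
    rw [pvInner2A_eq T0 newT i hlen punkty out hle hdisj]
    dsimp only
    set W := (out ++ pvRowPick newT punkty i).take newT.length with hW
    have hWle : W.length ≤ newT.length := by rw [hW]; simp
    by_cases hstop : W.length = newT.length
    · rw [if_pos (by exact_mod_cast hstop)]
      have hWlong : newT.length ≤ (out ++ pvRowPick newT punkty i).length := by
        by_contra hcon
        rw [hW, List.take_of_length_le (by omega)] at hstop
        omega
      rw [List.flatMap_cons, show out ++ (pvRowPick newT punkty i ++ cs.flatMap (pvRowPick newT punkty))
            = (out ++ pvRowPick newT punkty i) ++ cs.flatMap (pvRowPick newT punkty) by simp]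
      rw [List.take_append_of_le_length hWlong, ← hW]
    · rw [if_neg (by exact_mod_cast hstop)]
      have hWlt : W.length < newT.length := by omega
      have hWshort : (out ++ pvRowPick newT punkty i).length ≤ newT.length := by
        by_contra hcon
        rw [hW] at hWlt
        rw [List.length_take] at hWlt
        omega
      have hWid : W = out ++ pvRowPick newT punkty i := by
        rw [hW, List.take_of_length_le hWshort]
      rw [ih W (fun j hj => hcols j (by simp [hj])) hWle (Or.inr hWlt)]
      rw [hWid, List.flatMap_cons,
        show (out ++ pvRowPick newT punkty i) ++ cs.flatMap (pvRowPick newT punkty)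
          = out ++ (pvRowPick newT punkty i ++ cs.flatMap (pvRowPick newT punkty)) by simp]

-- ===== VERDICT (by name: the statement is the Claim_ definition above) =====
theorem zdjecie_spec : Claim_equal_zdjecie := by
  intro T m k hdom hpre
  obtain ⟨hrows, hksgn, hcrash⟩ := hpre
  unfold Spec_zdjecie
  simp only [zdjecie, zdjecie_alt]
  rcases (by omega : 0 ≤ k ∨ k < 0) with hk | hk
  · -- k ≥ 0
    set newT := T.map (fun e => [e.getD 0 0, e.getD 1 0]) with hnewT
    have hnlen : newT.length = T.length := by rw [hnewT]; simp
    have h0 : ((T.length : Int)) - 1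
        = (T.length : Int) - 1 - 0 * k - PySem.Int.floordiv (0 * (0 - 1)) 2 := by
      rw [show (0 : Int) * (0 - 1) = 2 * 0 by ring, pv_fd_two]; ring
    have hrEq : pvLoop1A k (PySem.List.pyRange 0 m 1) ((T.length : Int) - 1) [] newT
        = ((pvRowsB (T.length : Int) k (PySem.List.pyRange 0 m 1) [] newT.toArray).1,
           (pvRowsB (T.length : Int) k (PySem.List.pyRange 0 m 1) [] newT.toArray).2.toList) := by
      rw [h0]
      have := pvRows_eq (T.length : Int) k m m.toNat 0 (by omega) [] newT.toArray
      rwa [List.toList_toArray] at this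
    set s := pvLoop1A k (PySem.List.pyRange 0 m 1) ((T.length : Int) - 1) [] newT with hs
    set st := pvRowsB (T.length : Int) k (PySem.List.pyRange 0 m 1) [] newT.toArray with hst
    have hlen2 : s.2.length = T.length := by rw [hs, pvLoop1A_len, hnlen]
    have hpk : 0 < s.2.length ∨ ∀ p ∈ s.1.reverse, 0 ≤ p := by
      rcases Nat.eq_zero_or_pos T.length with hz | hp
      · right
        have hT : T = [] := List.length_eq_zero_iff.mp hz
        subst hT
        rcases (by omega : m ≤ 0 ∨ 0 < m) with hm | hm
        · rw [hs]
          rw [PySem.List.pyRange_one_eq_nil hm]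
          simp [pvLoop1A]
        · -- m > 0 and T = []: Pre_ forces k = 0
          have hk0 : k = 0 := by
            by_contra hne
            have hk1 : 1 ≤ k := by omega
            apply hcrash
            constructor
            · omega
            · refine ⟨0, by simp, by omega, by simp, ?_⟩
              simp [pvS]
              omega
          subst hk0
          simp [hs, hnewT, PySem.List.pyRange_one_cons hm, pvLoop1A]
      · left; omega
    have hcols : ∀ i ∈ PySem.List.pyRange 0 (k + m - 1) 1, 0 ≤ i := by
      intro i hi
      rw [PySem.List.mem_pyRange_one] at hi
      omega
    have h2 := pvLoop2A_eq T s.2 s.1.reverse hlen2 hpk (PySem.List.pyRange 0 (k + m - 1) 1)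
      [] hcols (by simp)
      (by rcases Nat.eq_zero_or_pos T.length with h0' | h0'
          · left; omega
          · right; simp; omega)
    simp only [List.nil_append, List.length_nil, List.drop_zero, Nat.cast_zero] at h2
    have hs1 : s.1 = st.1 := by rw [hrEq]
    have hs2 : s.2 = st.2.toList := by rw [hrEq]
    rw [h2, pvOutB_toList, ← hs1, ← hs2]
  · -- k < 0, hence m ≤ 0: both loops run over empty ranges
    have hm : m ≤ 0 := by
      rcases hksgn with h | h
      · omega
      · exact h
    have hc : k + m - 1 ≤ 0 := by omega
    rw [PySem.List.pyRange_one_eq_nil hm, PySem.List.pyRange_one_eq_nil hc]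
    simp [pvRowsB, pvLoop2A, pvOutB]
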